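-- pv_equiv track=rewrite | github.com/Wulfic/Cicada3301 | Tools/attack_p20_with_p18_key.py | string_to_indices
-- ===== SOURCE A (Python) =====
-- CHAR_TO_IDX = {
--     'F': 0, 'U': 1, 'TH': 2, 'O': 3, 'R': 4, 'C': 5, 'G': 6, 'W': 7,
--     'H': 8, 'N': 9, 'I': 10, 'J': 11, 'EO': 12, 'P': 13, 'X': 14,
--     'S': 15, 'T': 16, 'B': 17, 'E': 18, 'M': 19, 'L': 20, 'NG': 21, 'OE': 22,
--     'D': 23, 'A': 24, 'AE': 25, 'Y': 26, 'IA': 27, 'EA': 28, 'K': 5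
-- }
--
-- def string_to_indices(s):
--     """Convert a string to Gematria indices, handling digraphs."""
--     indices = []
--     i = 0
--     s = s.upper().replace(' ', '').replace('-', '')
--     while i < len(s):
--         matched = False
--         if i + 1 < len(s):
--             digraph = s[i:i+2]
--             if digraph in CHAR_TO_IDX:
--                 indices.append(CHAR_TO_IDX[digraph])
--                 i += 2
--                 matched = True
--         if not matched:
--             c = s[i]
--             if c in CHAR_TO_IDX:
--                 indices.append(CHAR_TO_IDX[c])
--             i += 1
--     return indices
-- ===== SOURCE B (Python) =====
-- CHAR_TO_IDX = {
--     'F': 0, 'U': 1, 'TH': 2, 'O': 3, 'R': 4, 'C': 5, 'G': 6, 'W': 7,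
--     'H': 8, 'N': 9, 'I': 10, 'J': 11, 'EO': 12, 'P': 13, 'X': 14,
--     'S': 15, 'T': 16, 'B': 17, 'E': 18, 'M': 19, 'L': 20, 'NG': 21, 'OE': 22,
--     'D': 23, 'A': 24, 'AE': 25, 'Y': 26, 'IA': 27, 'EA': 28, 'K': 5
-- }
--
-- DIGRAPHS = {'TH', 'EO', 'NG', 'OE', 'AE', 'IA', 'EA'}
--
--
-- def string_to_indices(s):
--     """Convert a string to Gematria indices, handling digraphs.
--
--     Single left-to-right fold with a one-character pending buffer:
--     no index arithmetic, no slicing."""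
--     s = s.upper().replace(' ', '').replace('-', '')
--     out = []
--     pending = None
--     for c in s:
--         if pending is not None:
--             pair = pending + c
--             if pair in DIGRAPHS:
--                 out.append(CHAR_TO_IDX[pair])
--                 pending = None
--                 continue
--             if pending in CHAR_TO_IDX:
--                 out.append(CHAR_TO_IDX[pending])
--         pending = c
--     if pending is not None and pending in CHAR_TO_IDX:
--         out.append(CHAR_TO_IDX[pending])
--     return out
-- ===== Notes on version B (the rewrite author's own statement) =====
-- stated objective: faster
-- what changed: Replaces A's index-based while loop with two-character slicing and i+=1/i+=2 branching by a single left fold over the characters that keeps a one-character pending buffer and a small digraph set, emitting the digraph index when pending+current is a digraph and flushing the pending single otherwise (no per-step slicing; measured constant-factor speedup).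
import Mathlib
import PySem

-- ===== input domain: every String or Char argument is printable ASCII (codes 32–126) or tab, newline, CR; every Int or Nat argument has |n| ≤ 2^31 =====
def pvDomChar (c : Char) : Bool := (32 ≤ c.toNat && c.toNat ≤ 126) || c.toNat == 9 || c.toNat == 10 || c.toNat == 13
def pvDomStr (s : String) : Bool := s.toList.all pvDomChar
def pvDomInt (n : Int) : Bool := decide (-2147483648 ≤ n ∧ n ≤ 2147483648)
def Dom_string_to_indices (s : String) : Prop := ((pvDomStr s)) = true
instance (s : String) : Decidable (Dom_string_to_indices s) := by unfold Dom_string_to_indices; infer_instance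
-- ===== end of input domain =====

-- B replaces A's index-and-slice while loop by a single left fold with a one-character
-- pending buffer (objective: faster; a timing run measured a constant-factor speedup).

-- ===== PORT A =====
def CHAR_TO_IDX : PySem.Dict String Int := PySem.Dict.ofList [("F",0),("U",1),("TH",2),("O",3),("R",4),("C",5),("G",6),("W",7),("H",8),("N",9),("I",10),("J",11),("EO",12),("P",13),("X",14),("S",15),("T",16),("B",17),("E",18),("M",19),("L",20),("NG",21),("OE",22),("D",23),("A",24),("AE",25),("Y",26),("IA",27),("EA",28),("K",5)]

-- A's while loop over index i, as structural recursion on the suffix s[i:];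
-- the `[c]` case is the `i + 1 < len(s)` guard failing.
def goA : List Char → List Int
  | [] => []
  | [c] =>
    match CHAR_TO_IDX.get? (String.ofList [c]) with
    | some v => [v]
    | none => []
  | c :: c2 :: rest =>
    match CHAR_TO_IDX.get? (String.ofList [c, c2]) with
    | some v => v :: goA rest
    | none =>
      match CHAR_TO_IDX.get? (String.ofList [c]) with
      | some v => v :: goA (c2 :: rest)
      | none => goA (c2 :: rest)

def string_to_indices (s : String) : List Int :=
  goA (PySem.Str.replace (PySem.Str.replace (PySem.Str.upper s) " " "") "-" "").toList

-- ===== PORT B =====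
def DIGRAPHS : PySem.Set String := PySem.Set.ofList ["TH","EO","NG","OE","AE","IA","EA"]

-- one iteration of B's for loop: state = (output so far, pending character)
def stepB (acc : List Int × Option Char) (c : Char) : List Int × Option Char :=
  match acc.2 with
  | none => (acc.1, some c)
  | some p =>
    if PySem.Set.contains DIGRAPHS (String.ofList [p, c]) then
      (acc.1 ++ [(CHAR_TO_IDX.get? (String.ofList [p, c])).getD 0], none)
    else
      match CHAR_TO_IDX.get? (String.ofList [p]) with
      | some v => (acc.1 ++ [v], some c)
      | none => (acc.1, some c)

-- B's final flush of the pending character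
def flushB (acc : List Int × Option Char) : List Int :=
  match acc.2 with
  | none => acc.1
  | some p =>
    match CHAR_TO_IDX.get? (String.ofList [p]) with
    | some v => acc.1 ++ [v]
    | none => acc.1

def string_to_indices_alt (s : String) : List Int :=
  flushB ((PySem.Str.replace (PySem.Str.replace (PySem.Str.upper s) " " "") "-" "").toList.foldl stepB ([], none))

-- ===== PRECONDITION & SPEC =====
def Spec_string_to_indices (s : String) (out : List Int) : Prop := out = string_to_indices_alt s
instance (s : String) (out : List Int) : Decidable (Spec_string_to_indices s out) := by unfold Spec_string_to_indices; infer_instance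

-- ===== CLAIM (what is proved, stated in full; the proofs are below) =====
def Claim_equal_string_to_indices : Prop := ∀ (s : String), Dom_string_to_indices s → Spec_string_to_indices s (string_to_indices s)

-- ===== LEMMAS AND PROOFS =====

theorem char_to_idx_eq : CHAR_TO_IDX = PySem.Dict.mk [("F",0),("U",1),("TH",2),("O",3),("R",4),("C",5),("G",6),("W",7),("H",8),("N",9),("I",10),("J",11),("EO",12),("P",13),("X",14),("S",15),("T",16),("B",17),("E",18),("M",19),("L",20),("NG",21),("OE",22),("D",23),("A",24),("AE",25),("Y",26),("IA",27),("EA",28),("K",5)] := by decide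

theorem strBeq (a b : String) : (a == b) = decide (a = b) := rfl

-- what both programs' digraph tests compute on a two-character string
def dig2 (p c : Char) : Option Int :=
  if p = 'T' ∧ c = 'H' then some 2 else if p = 'E' ∧ c = 'O' then some 12
  else if p = 'N' ∧ c = 'G' then some 21 else if p = 'O' ∧ c = 'E' then some 22
  else if p = 'A' ∧ c = 'E' then some 25 else if p = 'I' ∧ c = 'A' then some 27
  else if p = 'E' ∧ c = 'A' then some 28 else none

theorem and_decide_false {a b x y : Char} (h : ¬(x = a ∧ y = b)) :
    (decide (a = x) && decide (b = y)) = false := by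
  by_cases h1 : a = x
  · by_cases h2 : b = y
    · exact absurd ⟨h1.symm, h2.symm⟩ h
    · simp [h2]
  · simp [h1]

theorem get?_two (p c : Char) : CHAR_TO_IDX.get? (String.ofList [p, c]) = dig2 p c := by
  rw [char_to_idx_eq]
  simp only [PySem.Dict.get?, List.find?, strBeq]
  simp [String.ext_iff]
  unfold dig2
  by_cases h1 : p = 'T' ∧ c = 'H'
  · obtain ⟨hp, hc⟩ := h1; subst hp; subst hc; simp
  · rw [and_decide_false h1, if_neg h1]
    by_cases h2 : p = 'E' ∧ c = 'O'
    · obtain ⟨hp, hc⟩ := h2; subst hp; subst hc; simp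
    · rw [and_decide_false h2, if_neg h2]
      by_cases h3 : p = 'N' ∧ c = 'G'
      · obtain ⟨hp, hc⟩ := h3; subst hp; subst hc; simp
      · rw [and_decide_false h3, if_neg h3]
        by_cases h4 : p = 'O' ∧ c = 'E'
        · obtain ⟨hp, hc⟩ := h4; subst hp; subst hc; simp
        · rw [and_decide_false h4, if_neg h4]
          by_cases h5 : p = 'A' ∧ c = 'E'
          · obtain ⟨hp, hc⟩ := h5; subst hp; subst hc; simp
          · rw [and_decide_false h5, if_neg h5]
            by_cases h6 : p = 'I' ∧ c = 'A'
            · obtain ⟨hp, hc⟩ := h6; subst hp; subst hc; simp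
            · rw [and_decide_false h6, if_neg h6]
              by_cases h7 : p = 'E' ∧ c = 'A'
              · obtain ⟨hp, hc⟩ := h7; subst hp; subst hc; simp
              · rw [and_decide_false h7, if_neg h7]
                rfl

theorem contains_two (p c : Char) :
    PySem.Set.contains DIGRAPHS (String.ofList [p, c]) = (dig2 p c).isSome := by
  simp only [DIGRAPHS, PySem.Set.contains, PySem.Set.ofList]
  simp [String.ext_iff]
  unfold dig2
  split_ifs with h1 h2 h3 h4 h5 h6 h7 <;> simp_all

theorem flush_single (out : List Int) (p : Char) :
    flushB (out, some p) = out ++ goA [p] := by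
  cases h : CHAR_TO_IDX.get? (String.ofList [p]) <;> simp [flushB, goA, h]

theorem fold_some : ∀ (n : Nat) (l : List Char) (out : List Int) (p : Char), l.length ≤ n →
    flushB (l.foldl stepB (out, some p)) = out ++ goA (p :: l) := by
  intro n
  induction n with
  | zero =>
    intro l out p h
    have hl : l = [] := List.eq_nil_of_length_eq_zero (Nat.le_zero.mp h)
    subst hl
    exact flush_single out p
  | succ n ih =>
    intro l out p h
    cases l with
    | nil => exact flush_single out p
    | cons c l' =>
      simp only [List.foldl_cons]
      by_cases hd : PySem.Set.contains DIGRAPHS (String.ofList [p, c]) = true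
      · -- digraph matched: B emits it and clears the pending buffer
        have hsome : (dig2 p c).isSome = true := by rw [← contains_two]; exact hd
        obtain ⟨w, hw⟩ := Option.isSome_iff_exists.mp hsome
        have hget : CHAR_TO_IDX.get? (String.ofList [p, c]) = some w := by
          rw [get?_two, hw]
        have hmem : String.ofList [p, c] ∈ DIGRAPHS := by simpa using hd
        have hstep : stepB (out, some p) c = (out ++ [w], none) := by
          simp [stepB, hget, hmem]
        rw [hstep]
        have hgo : goA (p :: c :: l') = w :: goA l' := by
          simp [goA, hget]
        rw [hgo]
        cases l' with
        | nil => simp [flushB, goA]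
        | cons c' l'' =>
          have hstep2 : stepB (out ++ [w], none) c' = (out ++ [w], some c') := rfl
          simp only [List.foldl_cons, hstep2]
          rw [ih l'' (out ++ [w]) c' (by simp at h; omega)]
          simp
      · -- no digraph: B flushes the pending single and re-arms with c
        have hnone : dig2 p c = none := by
          have := contains_two p c
          rw [Bool.not_eq_true] at hd
          rw [hd] at this
          exact Option.not_isSome_iff_eq_none.mp (by rw [← this]; simp)
        have hget : CHAR_TO_IDX.get? (String.ofList [p, c]) = none := by
          rw [get?_two, hnone]
        have hmem : String.ofList [p, c] ∉ DIGRAPHS := by simpa using hd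
        cases he : CHAR_TO_IDX.get? (String.ofList [p]) with
        | some v =>
          have hstep : stepB (out, some p) c = (out ++ [v], some c) := by
            simp [stepB, hmem, he]
          rw [hstep, ih l' (out ++ [v]) c (by simp at h; omega)]
          simp [goA, hget, he]
        | none =>
          have hstep : stepB (out, some p) c = (out, some c) := by
            simp [stepB, hmem, he]
          rw [hstep, ih l' out c (by simp at h; omega)]
          simp [goA, hget, he]

theorem go_eq (l : List Char) : flushB (l.foldl stepB ([], none)) = goA l := by
  cases l with
  | nil => rfl
  | cons c l' =>
    have h1 : (c :: l').foldl stepB ([], none) = l'.foldl stepB ([], some c) := rfl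
    rw [h1, fold_some l'.length l' [] c le_rfl]
    simp

-- ===== VERDICT (by name: the statement is the Claim_ definition above) =====
theorem string_to_indices_spec : Claim_equal_string_to_indices := by
  intro s _
  unfold Spec_string_to_indices string_to_indices string_to_indices_alt
  rw [go_eq]
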